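-- pv_equiv track=rewrite | github.com/Rajarshi1-source/Modern_Password_Manager01 | tests/integration/test_chemical_storage_integration.py | _get_max_homopolymer_run
-- ===== SOURCE A (Python) =====
-- def _get_max_homopolymer_run(sequence):
--     """Helper to find max homopolymer run length."""
--     if not sequence:
--         return 0
--
--     max_run = 1
--     current_run = 1
--
--     for i in range(1, len(sequence)):
--         if sequence[i] == sequence[i-1] and sequence[i] != 'N':
--             current_run += 1
--             max_run = max(max_run, current_run)
--         else:
--             current_run = 1
--
--     return max_run
-- ===== SOURCE B (Python) =====
-- def _get_max_homopolymer_run(sequence):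
--     """Max homopolymer run length via run-length encoding, then a reduce over non-'N' runs."""
--     if not sequence:
--         return 0
--     groups = []
--     run_char, run_len = sequence[0], 1
--     for ch in sequence[1:]:
--         if ch == run_char:
--             run_len += 1
--         else:
--             groups.append((run_char, run_len))
--             run_char, run_len = ch, 1
--     groups.append((run_char, run_len))
--     best = 1
--     for ch, n in groups:
--         if ch != 'N':
--             best = max(best, n)
--     return best
-- ===== Notes on version B (the rewrite author's own statement) =====
-- stated objective: alternative
-- what changed: B first builds the run-length encoding of the sequence as (char, length) pairs, then takes the maximum length over non-'N' runs (default 1), instead of A's single pass maintaining current_run/max_run counters with the N-test inline.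
import Mathlib
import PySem

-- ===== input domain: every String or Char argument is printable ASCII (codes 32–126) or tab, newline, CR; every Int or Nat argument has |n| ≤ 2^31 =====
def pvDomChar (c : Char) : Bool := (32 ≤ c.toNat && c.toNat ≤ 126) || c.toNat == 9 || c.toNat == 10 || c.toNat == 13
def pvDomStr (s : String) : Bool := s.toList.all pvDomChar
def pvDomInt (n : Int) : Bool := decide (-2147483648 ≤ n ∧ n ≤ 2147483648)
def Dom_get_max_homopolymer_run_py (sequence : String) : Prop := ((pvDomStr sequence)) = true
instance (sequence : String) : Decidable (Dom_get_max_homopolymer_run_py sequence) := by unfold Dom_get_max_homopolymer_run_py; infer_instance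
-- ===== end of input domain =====

-- B replaces A's inline current_run/max_run counters by run-length encoding followed by a
-- filtered maximum over group lengths (objective: alternative decomposition, same O(n) cost).

-- ===== PORT A =====
-- A's for-loop over i in range(1, len) compares sequence[i] with sequence[i-1]; ported as a
-- recursion over the tail carrying the previous char and the (max_run, current_run) state.
def pvLoopA (prev : Char) (maxRun currentRun : Int) : List Char → Int
  | [] => maxRun
  | c :: rest =>
    if c = prev ∧ c ≠ 'N' then
      pvLoopA c (max maxRun (currentRun + 1)) (currentRun + 1) rest
    else
      pvLoopA c maxRun 1 rest

def get_max_homopolymer_run_py (sequence : String) : Int :=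
  match sequence.toList with
  | [] => 0
  | c :: rest => pvLoopA c 1 1 rest

-- ===== PORT B =====
-- Source B's first loop: run-length encode, carrying the current (run_char, run_len).
def pvGroups (runChar : Char) (runLen : Int) : List Char → List (Char × Int)
  | [] => [(runChar, runLen)]
  | c :: rest =>
    if c = runChar then pvGroups runChar (runLen + 1) rest
    else (runChar, runLen) :: pvGroups c 1 rest

-- Source B's second loop: best = max over non-'N' run lengths, starting at 1.
def pvBest (groups : List (Char × Int)) : Int :=
  groups.foldl (fun best p => if p.1 ≠ 'N' then max best p.2 else best) 1

def get_max_homopolymer_run_py_alt (sequence : String) : Int :=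
  match sequence.toList with
  | [] => 0
  | c :: rest => pvBest (pvGroups c 1 rest)

-- ===== PRECONDITION & SPEC =====
def Spec_get_max_homopolymer_run_py (sequence : String) (out : Int) : Prop := out = get_max_homopolymer_run_py_alt sequence
instance (sequence : String) (out : Int) : Decidable (Spec_get_max_homopolymer_run_py sequence out) := by unfold Spec_get_max_homopolymer_run_py; infer_instance

-- ===== CLAIM (what is proved, stated in full; the proofs are below) =====
def Claim_equal_get_max_homopolymer_run_py : Prop := ∀ (sequence : String), Dom_get_max_homopolymer_run_py sequence → Spec_get_max_homopolymer_run_py sequence (get_max_homopolymer_run_py sequence)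

-- ===== LEMMAS AND PROOFS =====

-- pvBest as a fold is ≥ its init generalisation: fold with init b.
def pvBestFrom (b : Int) (groups : List (Char × Int)) : Int :=
  groups.foldl (fun best p => if p.1 ≠ 'N' then max best p.2 else best) b

theorem pvBest_eq_from (g : List (Char × Int)) : pvBest g = pvBestFrom 1 g := rfl

theorem pvGroups_cons_eq (c : Char) (n : Int) (t : List Char) :
    pvGroups c n (c :: t) = pvGroups c (n + 1) t := by simp [pvGroups]

theorem pvGroups_cons_ne (c d : Char) (n : Int) (t : List Char) (h : d ≠ c) :
    pvGroups c n (d :: t) = (c, n) :: pvGroups d 1 t := by simp [pvGroups, h]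

theorem le_pvBestFrom (b : Int) (g : List (Char × Int)) : b ≤ pvBestFrom b g := by
  induction g generalizing b with
  | nil => simp [pvBestFrom]
  | cons p rest ih =>
    simp only [pvBestFrom, List.foldl] at *
    split
    · exact le_trans (le_max_left _ _) (ih _)
    · exact ih _

theorem pvBestFrom_max (a b : Int) (g : List (Char × Int)) :
    pvBestFrom (max a b) g = max a (pvBestFrom b g) := by
  induction g generalizing a b with
  | nil => simp [pvBestFrom]
  | cons p rest ih =>
    simp only [pvBestFrom, List.foldl] at *
    split
    · rw [max_assoc, ih]
    · exact ih a b

-- the N-run's recorded length is irrelevant to pvBest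
theorem pvGroups_N_irrel (rest : List Char) (n m : Int) :
    pvBestFrom 1 (pvGroups 'N' n rest) = pvBestFrom 1 (pvGroups 'N' m rest) := by
  induction rest generalizing n m with
  | nil => simp [pvGroups, pvBestFrom]
  | cons c t ih =>
    by_cases h : c = 'N'
    · subst h; rw [pvGroups_cons_eq, pvGroups_cons_eq]; exact ih _ _
    · simp [pvGroups, h, pvBestFrom]

-- a non-'N' current run of length n contributes at least n
theorem le_pvBest_groups (rest : List Char) (c : Char) (n : Int) (hc : c ≠ 'N') (hn : 1 ≤ n) :
    n ≤ pvBestFrom 1 (pvGroups c n rest) := by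
  induction rest generalizing c n with
  | nil => simp [pvGroups, pvBestFrom, hc]
  | cons d t ih =>
    by_cases h : d = c
    · subst h
      rw [pvGroups_cons_eq]
      have := ih d (n + 1) hc (by omega)
      omega
    · rw [pvGroups_cons_ne _ _ _ _ h]
      simp only [pvBestFrom, List.foldl, if_pos hc]
      calc n ≤ max 1 n := le_max_right _ _
        _ ≤ _ := le_pvBestFrom _ _

-- main invariant: A's loop equals max of maxRun and B's value on the remaining groups
theorem loopA_eq (rest : List Char) (prev : Char) (maxRun currentRun : Int)
    (h1 : 1 ≤ currentRun) (h2 : currentRun ≤ maxRun) :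
    pvLoopA prev maxRun currentRun rest = max maxRun (pvBestFrom 1 (pvGroups prev currentRun rest)) := by
  induction rest generalizing prev maxRun currentRun with
  | nil =>
    by_cases hp : prev = 'N'
    · simp [pvLoopA, pvGroups, pvBestFrom, hp]; omega
    · simp [pvLoopA, pvGroups, pvBestFrom, hp]; omega
  | cons c t ih =>
    by_cases hcp : c = prev
    · by_cases hN : c = 'N'
      · -- else branch of A (c = 'N'); group continues in B
        have : ¬ (c = prev ∧ c ≠ 'N') := by simp [hN]
        simp only [pvLoopA, if_neg this]
        rw [ih c maxRun 1 le_rfl (by omega)]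
        subst hcp hN
        rw [pvGroups_cons_eq, pvGroups_N_irrel t (currentRun + 1) 1]
      · -- then branch of A; group continues in B
        have hcond : c = prev ∧ c ≠ 'N' := ⟨hcp, hN⟩
        simp only [pvLoopA, if_pos hcond]
        rw [ih c (max maxRun (currentRun + 1)) (currentRun + 1) (by omega) (le_max_right _ _)]
        subst hcp
        rw [pvGroups_cons_eq]
        have := le_pvBest_groups t c (currentRun + 1) hN (by omega)
        omega
    · -- else branch of A (new char); B emits the finished group
      have : ¬ (c = prev ∧ c ≠ 'N') := by simp [hcp]
      simp only [pvLoopA, if_neg this]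
      rw [ih c maxRun 1 le_rfl (by omega)]
      rw [pvGroups_cons_ne _ _ _ _ hcp]
      by_cases hp : prev = 'N'
      · simp [pvBestFrom, List.foldl, hp]
      · simp only [pvBestFrom, List.foldl, if_pos hp]
        have h3 : (max 1 currentRun) = max currentRun 1 := max_comm _ _
        have h4 : pvBestFrom (max currentRun 1) (pvGroups c 1 t) =
            max currentRun (pvBestFrom 1 (pvGroups c 1 t)) := pvBestFrom_max _ _ _
        simp only [pvBestFrom] at h3 h4 ⊢
        rw [h3, h4]
        omega

-- ===== VERDICT (by name: the statement is the Claim_ definition above) =====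
theorem get_max_homopolymer_run_py_spec : Claim_equal_get_max_homopolymer_run_py := by
  intro s _
  unfold Spec_get_max_homopolymer_run_py get_max_homopolymer_run_py get_max_homopolymer_run_py_alt
  cases h : s.toList with
  | nil => rfl
  | cons c rest =>
    show pvLoopA c 1 1 rest = pvBest (pvGroups c 1 rest)
    rw [loopA_eq rest c 1 1 le_rfl le_rfl, pvBest_eq_from]
    have := le_pvBestFrom 1 (pvGroups c 1 rest)
    omega
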